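-- pv_equiv track=rewrite | github.com/yknot/adventOfCode | 2024/12_01.py | calculate_perimeter
-- ===== SOURCE A (Python) =====
-- def calculate_perimeter(region):
--     perimeter = 0
--     for x, y in list(region):
--         if (x + 1, y) not in region:
--             perimeter += 1
--         if (x - 1, y) not in region:
--             perimeter += 1
--         if (x, y + 1) not in region:
--             perimeter += 1
--         if (x, y - 1) not in region:
--             perimeter += 1
--
--     return perimeter
-- ===== SOURCE B (Python) =====
-- def calculate_perimeter(region):
--     # region is a set of distinct cells; each shared edge contributes to two
--     # cells, so perimeter = 4*cells - 2*edges, counting each edge once via its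
--     # right/up neighbour.
--     adjacencies = 0
--     for x, y in region:
--         if (x + 1, y) in region:
--             adjacencies += 1
--         if (x, y + 1) in region:
--             adjacencies += 1
--     return 4 * len(region) - 2 * adjacencies
-- ===== Notes on version B (the rewrite author's own statement) =====
-- stated objective: simpler
-- what changed: Instead of four absence checks per cell accumulating the perimeter, B counts each shared edge once via two presence checks per cell (right and up neighbour) and returns the closed form 4*len(region) - 2*adjacencies.
import Mathlib
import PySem

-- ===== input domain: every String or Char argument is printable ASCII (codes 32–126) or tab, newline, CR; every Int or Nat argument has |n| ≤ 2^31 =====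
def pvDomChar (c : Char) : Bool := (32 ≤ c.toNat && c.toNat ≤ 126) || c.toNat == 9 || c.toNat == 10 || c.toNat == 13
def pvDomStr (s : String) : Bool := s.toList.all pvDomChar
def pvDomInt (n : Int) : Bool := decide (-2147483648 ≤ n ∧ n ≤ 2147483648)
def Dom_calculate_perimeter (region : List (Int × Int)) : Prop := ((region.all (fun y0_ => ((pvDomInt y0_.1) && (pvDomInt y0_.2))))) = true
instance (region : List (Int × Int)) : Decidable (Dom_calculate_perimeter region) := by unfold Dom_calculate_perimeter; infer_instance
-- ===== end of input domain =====

-- B replaces A's four per-cell absence checks by the closed form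
-- 4*cells - 2*edges, counting each shared edge once (right/up neighbour).

-- ===== PORT A =====
def calculate_perimeter (region : List (Int × Int)) : Int :=
  region.foldl (fun perimeter c =>
    perimeter
      + (if (c.1 + 1, c.2) ∉ region then 1 else 0)
      + (if (c.1 - 1, c.2) ∉ region then 1 else 0)
      + (if (c.1, c.2 + 1) ∉ region then 1 else 0)
      + (if (c.1, c.2 - 1) ∉ region then 1 else 0)) 0

-- ===== PORT B =====
def calculate_perimeter_alt (region : List (Int × Int)) : Int :=
  let adjacencies : Int := region.foldl (fun a c =>
    a + (if (c.1 + 1, c.2) ∈ region then 1 else 0)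
      + (if (c.1, c.2 + 1) ∈ region then 1 else 0)) 0
  4 * (region.length : Int) - 2 * adjacencies

-- ===== PRECONDITION & SPEC =====
-- Pre_ excludes lists with duplicate cells: a region is semantically a set of
-- cells, and on duplicate-bearing lists A's per-occurrence recount is an
-- accident of list iteration that the edge-pairing identity does not follow.
def Pre_calculate_perimeter (region : List (Int × Int)) : Prop := region.Nodup
instance (region : List (Int × Int)) : Decidable (Pre_calculate_perimeter region) := by unfold Pre_calculate_perimeter; infer_instance

def pvWitness_calculate_perimeter : (List (Int × Int)) := [(0, 0), (1, 0), (1, 1)]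

def Spec_calculate_perimeter (region : List (Int × Int)) (out : Int) : Prop := out = calculate_perimeter_alt region
instance (region : List (Int × Int)) (out : Int) : Decidable (Spec_calculate_perimeter region out) := by unfold Spec_calculate_perimeter; infer_instance

-- ===== CLAIM (what is proved, stated in full; the proofs are below) =====
def Claim_equal_calculate_perimeter : Prop := ∀ (region : List (Int × Int)), Dom_calculate_perimeter region → Pre_calculate_perimeter region → Spec_calculate_perimeter region (calculate_perimeter region)

-- ===== LEMMAS AND PROOFS =====

-- 0/1 indicator of absence equals 1 minus the indicator of presence.
lemma ite_not_one_zero (P : Prop) [Decidable P] :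
    (if ¬ P then (1 : Int) else 0) = 1 - (if P then (1 : Int) else 0) := by
  by_cases h : P <;> simp [h]

-- A 0/1 presence sum over the region is a countP.
lemma sum_ind (R : List (Int × Int)) (f : (Int × Int) → (Int × Int)) :
    (R.map (fun c => if f c ∈ R then (1 : Int) else 0)).sum
      = (R.countP (fun c => decide (f c ∈ R)) : Int) := by
  rw [← PySem.List.sum_map_ite_one_zero (fun c => decide (f c ∈ R)) R]
  simp

-- On a duplicate-free region, as many cells have their (+dx,+dy) neighbour in
-- the region as have their (-dx,-dy) neighbour in it (the shift is a bijection
-- between the two kinds of adjacent pairs).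
lemma countP_shift (R : List (Int × Int)) (h : R.Nodup) (dx dy : Int) :
    R.countP (fun c => decide ((c.1 + dx, c.2 + dy) ∈ R))
      = R.countP (fun c => decide ((c.1 - dx, c.2 - dy) ∈ R)) := by
  rw [List.countP_eq_length_filter, List.countP_eq_length_filter,
    ← List.toFinset_card_of_nodup (h.filter _),
    ← List.toFinset_card_of_nodup (h.filter _),
    List.toFinset_filter, List.toFinset_filter]
  refine Finset.card_nbij' (fun c => (c.1 + dx, c.2 + dy))
    (fun d => (d.1 - dx, d.2 - dy)) ?_ ?_ ?_ ?_
  · intro c hc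
    simp only [Finset.coe_filter, Set.mem_setOf_eq, List.mem_toFinset, decide_eq_true_eq] at hc ⊢
    exact ⟨hc.2, by simpa using hc.1⟩
  · intro d hd
    simp only [Finset.coe_filter, Set.mem_setOf_eq, List.mem_toFinset, decide_eq_true_eq] at hd ⊢
    exact ⟨hd.2, by simpa using hd.1⟩
  · intro c _; simp
  · intro d _; simp

-- ===== VERDICT (by name: the statement is the Claim_ definition above) =====
theorem calculate_perimeter_spec : Claim_equal_calculate_perimeter := by
  intro region _ hnd
  unfold Spec_calculate_perimeter calculate_perimeter calculate_perimeter_alt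
  -- rewrite both folds as sums over the region
  have hA : region.foldl (fun perimeter c =>
      perimeter
        + (if (c.1 + 1, c.2) ∉ region then 1 else 0)
        + (if (c.1 - 1, c.2) ∉ region then 1 else 0)
        + (if (c.1, c.2 + 1) ∉ region then 1 else 0)
        + (if (c.1, c.2 - 1) ∉ region then 1 else 0)) 0
      = (region.map (fun c =>
          ((1 - (if (c.1 + 1, c.2) ∈ region then (1:Int) else 0))
            + (1 - (if (c.1 - 1, c.2) ∈ region then (1:Int) else 0)))
          + ((1 - (if (c.1, c.2 + 1) ∈ region then (1:Int) else 0))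
            + (1 - (if (c.1, c.2 - 1) ∈ region then (1:Int) else 0))))).sum := by
    rw [show (fun (perimeter : Int) (c : Int × Int) =>
        perimeter
          + (if (c.1 + 1, c.2) ∉ region then 1 else 0)
          + (if (c.1 - 1, c.2) ∉ region then 1 else 0)
          + (if (c.1, c.2 + 1) ∉ region then 1 else 0)
          + (if (c.1, c.2 - 1) ∉ region then 1 else 0))
      = (fun (perimeter : Int) (c : Int × Int) =>
        perimeter + (((1 - (if (c.1 + 1, c.2) ∈ region then (1:Int) else 0))
            + (1 - (if (c.1 - 1, c.2) ∈ region then (1:Int) else 0)))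
          + ((1 - (if (c.1, c.2 + 1) ∈ region then (1:Int) else 0))
            + (1 - (if (c.1, c.2 - 1) ∈ region then (1:Int) else 0))))) from by
        funext p c
        rw [ite_not_one_zero, ite_not_one_zero, ite_not_one_zero, ite_not_one_zero]
        ring]
    rw [PySem.List.foldl_add]
    ring
  have hB : region.foldl (fun a c =>
      a + (if (c.1 + 1, c.2) ∈ region then 1 else 0)
        + (if (c.1, c.2 + 1) ∈ region then 1 else 0)) 0
      = (region.map (fun c =>
          (if (c.1 + 1, c.2) ∈ region then (1:Int) else 0)
            + (if (c.1, c.2 + 1) ∈ region then (1:Int) else 0))).sum := by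
    rw [show (fun (a : Int) (c : Int × Int) =>
        a + (if (c.1 + 1, c.2) ∈ region then 1 else 0)
          + (if (c.1, c.2 + 1) ∈ region then 1 else 0))
      = (fun (a : Int) (c : Int × Int) =>
        a + ((if (c.1 + 1, c.2) ∈ region then (1:Int) else 0)
          + (if (c.1, c.2 + 1) ∈ region then (1:Int) else 0))) from by
        funext p c; ring]
    rw [PySem.List.foldl_add]
    ring
  rw [hA, hB]
  -- split into indicator sums
  rw [PySem.List.sum_map_add_int region
    (fun c => (1 - (if (c.1 + 1, c.2) ∈ region then (1:Int) else 0))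
      + (1 - (if (c.1 - 1, c.2) ∈ region then (1:Int) else 0)))
    (fun c => (1 - (if (c.1, c.2 + 1) ∈ region then (1:Int) else 0))
      + (1 - (if (c.1, c.2 - 1) ∈ region then (1:Int) else 0))),
    PySem.List.sum_map_add_int region
    (fun c => 1 - (if (c.1 + 1, c.2) ∈ region then (1:Int) else 0))
    (fun c => 1 - (if (c.1 - 1, c.2) ∈ region then (1:Int) else 0)),
    PySem.List.sum_map_add_int region
    (fun c => 1 - (if (c.1, c.2 + 1) ∈ region then (1:Int) else 0))
    (fun c => 1 - (if (c.1, c.2 - 1) ∈ region then (1:Int) else 0)),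
    PySem.List.sum_map_add_int region
    (fun c => (if (c.1 + 1, c.2) ∈ region then (1:Int) else 0))
    (fun c => (if (c.1, c.2 + 1) ∈ region then (1:Int) else 0))]
  have hsub : ∀ f : (Int × Int) → (Int × Int),
      (region.map (fun c => 1 - (if f c ∈ region then (1:Int) else 0))).sum
        = (region.length : Int) - (region.countP (fun c => decide (f c ∈ region)) : Int) := by
    intro f
    rw [show (fun c => 1 - (if f c ∈ region then (1:Int) else 0))
      = (fun c => 1 + (-(if f c ∈ region then (1:Int) else 0))) from by funext c; ring]
    rw [PySem.List.sum_map_add_int region (fun _ => (1:Int))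
      (fun c => -(if f c ∈ region then (1:Int) else 0))]
    rw [show (region.map (fun c => -(if f c ∈ region then (1:Int) else 0)))
      = (region.map (fun c => (if f c ∈ region then (1:Int) else 0))).map Neg.neg from by
        rw [List.map_map]; rfl]
    rw [← List.sum_neg, sum_ind region f]
    simp
    ring
  rw [hsub (fun c => (c.1 + 1, c.2)), hsub (fun c => (c.1 - 1, c.2)),
    hsub (fun c => (c.1, c.2 + 1)), hsub (fun c => (c.1, c.2 - 1)),
    sum_ind region (fun c => (c.1 + 1, c.2)), sum_ind region (fun c => (c.1, c.2 + 1))]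
  have h1 := countP_shift region hnd 1 0
  have h2 := countP_shift region hnd 0 1
  simp only [add_zero, sub_zero] at h1 h2
  rw [← h1, ← h2] -- replace the (-) counts by the (+) counts
  ring
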